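-- pv_equiv track=rewrite | github.com/justinwjl/GTB-DTI | featurize/base.py | encoding_unk
-- ===== SOURCE A (Python) =====
-- def encoding_unk(x, allowable_set):
--     enlist = [False for i in range(len(allowable_set))]
--     i = 0
--     for atom in x:
--         if atom in allowable_set:
--             enlist[allowable_set.index(atom)] = True
--             i += 1
--     if i != len(x):
--         enlist[-1] = True
--     return enlist
-- ===== SOURCE B (Python) =====
-- def encoding_unk(x, allowable_set):
--     enlist = [val in x for val in allowable_set]
--     if any(atom not in allowable_set for atom in x):
--         enlist[-1] = True
--     return enlist
-- ===== Notes on version B (the rewrite author's own statement) =====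
-- stated objective: idiomatic
-- what changed: B builds the vector by a membership comprehension over allowable_set and an any() check for unknown atoms, instead of A's mutate-and-count loop over x with repeated list.index scans; Pre_ excludes empty allowable_set with nonempty x (A raises IndexError there) and allowable_sets with duplicate labels, where A's marking only the first duplicate slot is an accident of list.index and marking every matching slot is equally defensible.
-- outside the precondition, e.g. on encoding_unk(['a'], ['a', 'a']): A returns [True, False], B returns [True, True]; on encoding_unk(['q'], []): A raises IndexError, B raises IndexError
import Mathlib
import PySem

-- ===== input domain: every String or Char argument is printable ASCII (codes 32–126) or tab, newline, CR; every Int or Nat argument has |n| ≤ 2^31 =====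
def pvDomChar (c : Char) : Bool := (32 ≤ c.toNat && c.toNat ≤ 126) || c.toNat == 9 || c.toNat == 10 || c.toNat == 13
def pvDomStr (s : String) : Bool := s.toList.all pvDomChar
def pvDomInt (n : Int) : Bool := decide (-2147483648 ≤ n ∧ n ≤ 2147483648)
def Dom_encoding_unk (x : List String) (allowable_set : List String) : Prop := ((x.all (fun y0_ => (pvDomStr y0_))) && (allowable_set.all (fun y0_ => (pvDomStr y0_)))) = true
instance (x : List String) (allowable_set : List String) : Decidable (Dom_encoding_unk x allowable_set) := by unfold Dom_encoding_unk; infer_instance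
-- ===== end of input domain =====

-- B builds the one-hot vector by a membership map over the label set plus an any() unknown
-- check, instead of A's mutate-and-count loop over x with repeated list.index scans; idiomatic.

-- ===== PORT A =====
def encoding_unk (x : List String) (allowable_set : List String) : List Bool :=
  let r := x.foldl (fun st atom =>
      if allowable_set.contains atom then
        (st.1.set ((PySem.List.index? allowable_set atom).getD 0) true, st.2 + 1)
      else st)
    (List.replicate allowable_set.length false, (0 : Nat))
  if r.2 ≠ x.length then r.1.set (r.1.length - 1) true else r.1

-- ===== PORT B =====
def encoding_unk_alt (x : List String) (allowable_set : List String) : List Bool :=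
  let enlist := allowable_set.map (fun val => x.contains val)
  if x.any (fun atom => !allowable_set.contains atom) then enlist.set (enlist.length - 1) true
  else enlist

-- ===== PRECONDITION & SPEC =====
-- Pre_ excludes (a) empty allowable_set with nonempty x, where A raises IndexError on
-- enlist[-1] (B raises there too), and (b) inputs where some atom of x occurs more than once
-- in allowable_set: on such degenerate label sets A's marking only the first duplicate slot is
-- an accident of list.index and marking every matching slot is equally defensible.
def Pre_encoding_unk (x : List String) (allowable_set : List String) : Prop :=
  (allowable_set ≠ [] ∨ x = []) ∧ ∀ v ∈ x, allowable_set.count v ≤ 1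
instance (x : List String) (allowable_set : List String) : Decidable (Pre_encoding_unk x allowable_set) := by unfold Pre_encoding_unk; infer_instance
def pvWitness_encoding_unk : List String × List String := (["a", "q"], ["a", "b"])
def Spec_encoding_unk (x : List String) (allowable_set : List String) (out : List Bool) : Prop := out = encoding_unk_alt x allowable_set
instance (x : List String) (allowable_set : List String) (out : List Bool) : Decidable (Spec_encoding_unk x allowable_set out) := by unfold Spec_encoding_unk; infer_instance

-- ===== CLAIM (what is proved, stated in full; the proofs are below) =====
def Claim_equal_encoding_unk : Prop := ∀ (x : List String) (allowable_set : List String), Dom_encoding_unk x allowable_set → Pre_encoding_unk x allowable_set → Spec_encoding_unk x allowable_set (encoding_unk x allowable_set)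

-- ===== LEMMAS AND PROOFS =====

-- the vector A has built after processing the atoms p, under first-index semantics
def mvec (as p : List String) : List Bool :=
  as.zipIdx.map (fun vj => p.contains vj.1 && ((PySem.List.index? as vj.1).getD 0 == vj.2))

theorem length_mvec (as p : List String) : (mvec as p).length = as.length := by
  simp [mvec]

theorem getElem_mvec (as p : List String) (j : Nat) (hj : j < as.length) :
    (mvec as p)[j]'(by simp [length_mvec, hj]) =
      (p.contains as[j] && ((PySem.List.index? as as[j]).getD 0 == j)) := by
  simp [mvec]

theorem mvec_nil (as : List String) : mvec as [] = List.replicate as.length false := by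
  apply List.ext_getElem (by simp [length_mvec])
  intro j h1 h2
  simp [mvec]

theorem mvec_mid_not_mem (as p t : List String) (a : String) (ha : a ∉ as) :
    mvec as (p ++ a :: t) = mvec as (p ++ t) := by
  apply List.ext_getElem (by simp [length_mvec])
  intro j h1 h2
  rw [length_mvec] at h1
  rw [getElem_mvec as _ j h1, getElem_mvec as _ j h1]
  have hne : as[j] ≠ a := fun h => ha (h ▸ List.getElem_mem h1)
  simp [hne]


theorem mvec_snoc_mem (as p : List String) (a : String) (ha : a ∈ as) :
    (mvec as p).set ((PySem.List.index? as a).getD 0) true = mvec as (p ++ [a]) := by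
  obtain ⟨k, hk⟩ := Option.isSome_iff_exists.1 ((PySem.List.index?_isSome_iff (xs := as) (v := a)).2 ha)
  obtain ⟨hklt, hak, hfirst⟩ := PySem.List.getElem_of_index?_eq_some hk
  rw [hk]
  apply List.ext_getElem (by simp [length_mvec])
  intro j h1 h2
  rw [length_mvec] at h2
  rw [List.getElem_set, getElem_mvec as p j h2, getElem_mvec as (p ++ [a]) j h2]
  simp only [Option.getD_some]
  by_cases hjk : k = j
  · subst hjk
    rw [if_pos rfl, hak, hk]
    simp
  · by_cases hja : as[j] = a
    · rw [if_neg hjk, hja, hk]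
      simp [hjk]
    · rw [if_neg hjk]
      simp [hja]

theorem foldl_mvec (as : List String) (x : List String) : ∀ (p : List String) (n : Nat),
    x.foldl (fun st atom =>
      if as.contains atom then
        (st.1.set ((PySem.List.index? as atom).getD 0) true, st.2 + 1)
      else st) (mvec as p, n)
    = (mvec as (p ++ x), n + x.countP (fun a => as.contains a)) := by
  induction x with
  | nil => intro p n; simp
  | cons a t ih =>
    intro p n
    simp only [List.foldl_cons]
    by_cases ha : a ∈ as
    · rw [if_pos (by simpa using ha : as.contains a = true)]
      rw [mvec_snoc_mem as p a ha, ih (p ++ [a]) (n + 1)]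
      rw [show (p ++ [a]) ++ t = p ++ a :: t by simp]
      have hc : List.countP (fun a => as.contains a) (a :: t)
          = List.countP (fun a => as.contains a) t + 1 := by
        simp [ha]
      rw [hc]
      have harith : n + 1 + List.countP (fun a => as.contains a) t
          = n + (List.countP (fun a => as.contains a) t + 1) := by omega
      rw [harith]
    · rw [if_neg (by simpa using ha), ih p n]
      have h1 : mvec as (p ++ a :: t) = mvec as (p ++ t) := mvec_mid_not_mem as p t a ha
      have h2 : List.countP (fun a => as.contains a) (a :: t)
          = List.countP (fun a => as.contains a) t := by
        simp [ha]
      rw [h1, h2]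

theorem countP_ne_iff_any (as x : List String) :
    (x.countP (fun a => as.contains a) ≠ x.length) ↔
      (x.any fun atom => !as.contains atom) = true := by
  rw [List.any_eq_true]
  constructor
  · intro h
    by_contra hall
    apply h
    apply List.countP_eq_length.2
    intro a hmem
    by_contra hna
    exact hall ⟨a, hmem, by simpa using hna⟩
  · rintro ⟨a, hmem, hna⟩ h
    have := List.countP_eq_length.1 h a hmem
    simp at hna
    simp [hna] at this

-- when no atom of p has a duplicate in as, first-index marking is plain membership marking
theorem mvec_eq_map (as p : List String) (hnd : ∀ v ∈ p, as.count v ≤ 1) :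
    mvec as p = as.map (fun v => p.contains v) := by
  apply List.ext_getElem (by simp [length_mvec])
  intro j h1 h2
  rw [length_mvec] at h1
  rw [getElem_mvec as p j h1]
  by_cases hp : p.contains as[j]
  · have hmem : as[j] ∈ as := List.getElem_mem h1
    obtain ⟨k, hk⟩ := Option.isSome_iff_exists.1 ((PySem.List.index?_isSome_iff (xs := as) (v := as[j])).2 hmem)
    obtain ⟨hklt, hak, hfirst⟩ := PySem.List.getElem_of_index?_eq_some hk
    have hkj : k = j := by
      by_contra hne
      have hklj : k < j := by
        rcases Nat.lt_or_ge k j with h | h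
        · exact h
        · rcases Nat.lt_or_ge j k with h' | h'
          · exact absurd rfl (hfirst j h')
          · omega
      have hdup : List.Duplicate as[j] as := by
        rw [List.duplicate_iff_exists_distinct_get]
        exact ⟨⟨k, hklt⟩, ⟨j, h1⟩, hklj, by simp [hak], by simp⟩
      have h2le := List.duplicate_iff_two_le_count.1 hdup
      have := hnd as[j] (by simpa using hp)
      omega
    rw [hk]
    subst hkj
    simp
  · have hf : as[j] ∉ p := by simpa using hp
    simp [hf]

theorem encoding_unk_eq (x as : List String) : encoding_unk x as =
    if x.countP (fun a => as.contains a) ≠ x.length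
    then (mvec as x).set ((mvec as x).length - 1) true else mvec as x := by
  unfold encoding_unk
  rw [← mvec_nil as, foldl_mvec as x [] 0]
  simp only [List.nil_append, Nat.zero_add]

theorem encoding_unk_alt_eq (x as : List String) : encoding_unk_alt x as =
    if (x.any fun atom => !as.contains atom) = true
    then (as.map (fun v => x.contains v)).set ((as.map (fun v => x.contains v)).length - 1) true
    else as.map (fun v => x.contains v) := rfl

-- ===== VERDICT (by name: the statement is the Claim_ definition above) =====
theorem encoding_unk_spec : Claim_equal_encoding_unk := by
  intro x as _ hpre
  show encoding_unk x as = encoding_unk_alt x as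
  rw [encoding_unk_eq, mvec_eq_map as x hpre.2, encoding_unk_alt_eq]
  by_cases hu : (x.any fun atom => !as.contains atom) = true
  · rw [if_pos ((countP_ne_iff_any as x).2 hu), if_pos hu]
  · rw [if_neg (fun hc => hu ((countP_ne_iff_any as x).1 hc)), if_neg hu]
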